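-- pv_equiv track=rewrite | github.com/Marcelinoama/solsimilarity | similarity_calculator.py | _sanitize_url_for_html
-- ===== SOURCE A (Python) =====
-- def _sanitize_url_for_html(url: str) -> str:
--     """Sanitiza URL para uso seguro em atributos HTML"""
--     if not url:
--         return ""
--
--     url = url.strip()
--     # Escapa caracteres problemáticos em URLs
--     url = url.replace('"', '%22')
--     url = url.replace("'", '%27')
--     url = url.replace(' ', '%20')
--     # Remove possíveis caracteres de controle
--     url = ''.join(char for char in url if ord(char) >= 32)
--
--     return url
-- ===== SOURCE B (Python) =====
-- def _sanitize_url_for_html(url: str) -> str: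
--     """Sanitiza URL para uso seguro em atributos HTML (single pass)."""
--     out = []
--     for ch in url.strip():
--         o = ord(ch)
--         if o < 32:
--             continue
--         if ch == '"':
--             out.append('%22')
--         elif ch == "'":
--             out.append('%27')
--         elif ch == ' ':
--             out.append('%20')
--         else:
--             out.append(ch)
--     return ''.join(out)
-- ===== Notes on version B (the rewrite author's own statement) =====
-- stated objective: idiomatic
-- what changed: Replaced three sequential .replace() scans plus a filtering join (four passes over the string) with a single explicit loop that skips control characters and emits the escape for quote/apostrophe/space per character.
import Mathlib
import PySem

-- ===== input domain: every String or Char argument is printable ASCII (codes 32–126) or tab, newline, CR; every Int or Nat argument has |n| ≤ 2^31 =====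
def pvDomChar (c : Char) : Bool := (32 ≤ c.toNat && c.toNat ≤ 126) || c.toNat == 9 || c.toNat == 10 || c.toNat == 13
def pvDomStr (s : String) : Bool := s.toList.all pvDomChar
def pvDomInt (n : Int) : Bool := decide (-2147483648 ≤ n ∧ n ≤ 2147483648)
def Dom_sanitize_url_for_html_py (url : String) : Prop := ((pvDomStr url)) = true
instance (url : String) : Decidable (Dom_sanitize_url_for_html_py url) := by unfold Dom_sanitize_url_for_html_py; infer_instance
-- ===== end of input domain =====

-- B replaces A's three sequential replace() scans plus a filtering join by one
-- single-pass per-character loop (idiomatic/alternative decomposition); same return value.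


-- ===== PORT A =====
def sanitize_url_for_html_py (url : String) : String :=
  if url = "" then ""
  else
    let u1 := PySem.Str.strip url
    let u2 := PySem.Str.replace u1 "\"" "%22"
    let u3 := PySem.Str.replace u2 "'" "%27"
    let u4 := PySem.Str.replace u3 " " "%20"
    String.ofList (u4.toList.filter (fun c => 32 ≤ c.toNat))

-- ===== PORT B =====
-- one character of B's single pass: skip control chars, escape " ' space
def sanitizeChar (c : Char) : List Char :=
  if c.toNat < 32 then []
  else if c = '"' then ['%', '2', '2']
  else if c = '\'' then ['%', '2', '7']
  else if c = ' ' then ['%', '2', '0']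
  else [c]

def sanitize_url_for_html_py_alt (url : String) : String :=
  String.ofList ((PySem.Str.strip url).toList.flatMap sanitizeChar)

-- ===== PRECONDITION & SPEC =====
def Spec_sanitize_url_for_html_py (url : String) (out : String) : Prop := out = sanitize_url_for_html_py_alt url
instance (url : String) (out : String) : Decidable (Spec_sanitize_url_for_html_py url out) := by unfold Spec_sanitize_url_for_html_py; infer_instance

-- ===== CLAIM (what is proved, stated in full; the proofs are below) =====
def Claim_equal_sanitize_url_for_html_py : Prop := ∀ (url : String), Dom_sanitize_url_for_html_py url → Spec_sanitize_url_for_html_py url (sanitize_url_for_html_py url)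

-- ===== LEMMAS AND PROOFS =====

-- replace with a single-character needle is a per-character flatMap
theorem replace_go_single (a : Char) (new : List Char) :
    ∀ (s : List Char) (fuel : Nat) (acc : List Char), s.length ≤ fuel →
      PySem.Chars.replace.go [a] new fuel s acc
        = acc.reverse ++ s.flatMap (fun c => if c = a then new else [c]) := by
  intro s
  induction s with
  | nil =>
    intro fuel acc _
    cases fuel <;> simp [PySem.Chars.replace.go]
  | cons c t ih =>
    intro fuel acc hf
    cases fuel with
    | zero => simp at hf
    | succ n =>
      by_cases hc : c = a
      · subst hc
        have : List.isPrefixOf [c] (c :: t) = true := by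
          simp [List.isPrefixOf]
        rw [PySem.Chars.replace.go]
        simp only [this, if_pos, List.length_cons, List.length_nil, List.drop_succ_cons,
          List.drop_zero]
        rw [ih n (new.reverse ++ acc) (by simpa using hf)]
        simp
      · have : List.isPrefixOf [a] (c :: t) = false := by
          simp [List.isPrefixOf]
          exact fun h => hc h.symm
        rw [PySem.Chars.replace.go]
        simp only [this]
        rw [ih n (c :: acc) (by simpa using Nat.succ_le_succ_iff.mp hf)]
        simp [hc]

theorem replace_single (a : Char) (new s : List Char) :
    PySem.Chars.replace s [a] new = s.flatMap (fun c => if c = a then new else [c]) := by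
  rw [PySem.Chars.replace, if_neg (by simp)]
  exact replace_go_single a new s s.length [] (le_refl _)

theorem pointwise (c : Char) :
    (((if c = '"' then "%22".toList else [c]).flatMap
        (fun d => (if d = '\'' then "%27".toList else [d]).flatMap
          (fun e => if e = ' ' then "%20".toList else [e]))).filter
        (fun d => 32 ≤ d.toNat)) = sanitizeChar c := by
  by_cases h1 : c = '"'
  · subst h1; decide
  · by_cases h2 : c = '\''
    · subst h2; decide
    · by_cases h3 : c = ' '
      · subst h3; decide
      · simp only [if_neg h1, List.flatMap_cons, List.flatMap_nil, if_neg h2, List.append_nil,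
          if_neg h3]
        by_cases h4 : c.toNat < 32
        · simp [sanitizeChar, h4, List.filter, Nat.not_le.mpr h4]
        · simp [sanitizeChar, h4, h1, h2, h3, List.filter, Nat.le_of_not_lt h4]

-- ===== VERDICT (by name: the statement is the Claim_ definition above) =====
theorem sanitize_url_for_html_py_spec : Claim_equal_sanitize_url_for_html_py := by
  intro url _
  unfold Spec_sanitize_url_for_html_py sanitize_url_for_html_py sanitize_url_for_html_py_alt
  by_cases h : url = ""
  · subst h; decide
  · simp only [if_neg h]
    apply congrArg String.ofList
    have hr : ∀ (s old new : String) (a : Char), old.toList = [a] →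
        (PySem.Str.replace s old new).toList
          = s.toList.flatMap (fun c => if c = a then new.toList else [c]) := by
      intro s old new a ha
      rw [PySem.Str.toList_replace, ha, replace_single]
    rw [hr _ _ _ ' ' (by decide), hr _ _ _ '\'' (by decide), hr _ _ _ '"' (by decide)]
    rw [List.flatMap_assoc, List.flatMap_assoc, List.filter_flatMap]
    simp only [pointwise]
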